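-- pv_equiv track=rewrite | github.com/m1gwings/gaussian-elimination | main.py | i_row_leftmost_pivot
-- ===== SOURCE A (Python) =====
-- def j_pivot(row):
--     for j in range(len(row)):
--         if row[j] != 0:
--             return j, True
--     return 0, False
--
-- def i_row_leftmost_pivot(matrix):
--     i_leftmost_pivot, j_leftmost_pivot = 0, len(matrix[0])
--     for i in range(len(matrix)):
--         row = matrix[i]
--         j_pivot_row, pivot_exists = j_pivot(row)
--         if j_pivot_row < j_leftmost_pivot and pivot_exists:
--             j_leftmost_pivot = j_pivot_row
--             i_leftmost_pivot = i
--
--     return i_leftmost_pivot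
-- ===== SOURCE B (Python) =====
-- def i_row_leftmost_pivot(matrix):
--     width = len(matrix[0])
--     for j in range(width):
--         for i, row in enumerate(matrix):
--             if j < len(row) and row[j] != 0:
--                 return i
--     return 0
-- ===== Notes on version B (the rewrite author's own statement) =====
-- stated objective: alternative
-- what changed: Replaces the row-major scan that computes each row's pivot with a helper and keeps a running best (row, column) pair by a column-major search that returns the first row with a nonzero entry in the leftmost nonzero column, with no helper and no accumulator.
import Mathlib
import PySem

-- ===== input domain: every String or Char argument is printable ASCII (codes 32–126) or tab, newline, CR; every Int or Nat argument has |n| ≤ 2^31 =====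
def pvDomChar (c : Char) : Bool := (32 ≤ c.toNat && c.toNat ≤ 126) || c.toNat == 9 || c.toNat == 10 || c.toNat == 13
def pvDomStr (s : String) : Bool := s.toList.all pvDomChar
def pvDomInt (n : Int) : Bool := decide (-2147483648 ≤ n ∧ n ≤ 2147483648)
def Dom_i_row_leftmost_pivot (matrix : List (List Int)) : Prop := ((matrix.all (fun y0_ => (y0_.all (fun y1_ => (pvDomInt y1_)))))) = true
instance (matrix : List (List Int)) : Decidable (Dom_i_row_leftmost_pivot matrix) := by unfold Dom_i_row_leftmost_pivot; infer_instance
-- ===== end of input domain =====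

-- B replaces A's per-row pivot helper + running-best accumulator with a column-major
-- search (first row hit in the leftmost nonzero column); same cost, no accumulator.

-- ===== PORT A =====
-- helper j_pivot: scan the row, return (index, True) at the first nonzero, else (0, False)
def jPivotAux : List Int → Int → Int × Bool
  | [], _ => (0, false)
  | x :: xs, j => if x ≠ 0 then (j, true) else jPivotAux xs (j + 1)

def jPivot (row : List Int) : Int × Bool := jPivotAux row 0

-- the main loop of A: state (i_leftmost_pivot, j_leftmost_pivot), i the running row index
def aLoop : List (List Int) → Int → Int × Int → Int × Int
  | [], _, st => st
  | row :: rest, i, (il, jl) =>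
    let pr := jPivot row
    aLoop rest (i + 1) (if pr.1 < jl ∧ pr.2 = true then (i, pr.1) else (il, jl))

def i_row_leftmost_pivot (matrix : List (List Int)) : Int :=
  (aLoop matrix 0 (0, ((matrix.headD []).length : Int))).1

-- ===== PORT B =====
-- inner loop of B: scan the rows at column j (i the running row index), return the
-- first row index with an in-range nonzero entry at column j
def colScan : List (List Int) → Nat → Nat → Option Nat
  | [], _, _ => none
  | row :: rest, j, i =>
    if j < row.length ∧ row.getD j 0 ≠ 0 then some i else colScan rest j (i + 1)

-- outer loop of B: try the columns left to right, return on the first hit, else 0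
def jLoop (matrix : List (List Int)) : List Nat → Int
  | [] => 0
  | j :: js =>
    match colScan matrix j 0 with
    | some i => (i : Int)
    | none => jLoop matrix js

def i_row_leftmost_pivot_alt (matrix : List (List Int)) : Int :=
  jLoop matrix (List.range (matrix.headD []).length)

-- ===== PRECONDITION & SPEC =====
-- Pre_ excludes only the empty matrix, on which A raises IndexError at matrix[0].
def Pre_i_row_leftmost_pivot (matrix : List (List Int)) : Prop := matrix ≠ []
instance (matrix : List (List Int)) : Decidable (Pre_i_row_leftmost_pivot matrix) := by
  unfold Pre_i_row_leftmost_pivot; infer_instance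

def pvWitness_i_row_leftmost_pivot : List (List Int) := [[0, 3], [2, 0]]

def Spec_i_row_leftmost_pivot (matrix : List (List Int)) (out : Int) : Prop := out = i_row_leftmost_pivot_alt matrix
instance (matrix : List (List Int)) (out : Int) : Decidable (Spec_i_row_leftmost_pivot matrix out) := by unfold Spec_i_row_leftmost_pivot; infer_instance

-- ===== CLAIM (what is proved, stated in full; the proofs are below) =====
def Claim_equal_i_row_leftmost_pivot : Prop := ∀ (matrix : List (List Int)), Dom_i_row_leftmost_pivot matrix → Pre_i_row_leftmost_pivot matrix → Spec_i_row_leftmost_pivot matrix (i_row_leftmost_pivot matrix)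

-- ===== LEMMAS AND PROOFS =====

-- first-nonzero index of a row, as a clean recursive spec
def pivNat : List Int → Option Nat
  | [] => none
  | x :: xs => if x ≠ 0 then some 0 else (pivNat xs).map (· + 1)

-- "row has an in-range nonzero entry at column j"
abbrev Hit (j : Nat) (row : List Int) : Prop := j < row.length ∧ row.getD j 0 ≠ 0

theorem jPivotAux_eq (row : List Int) : ∀ j : Int,
    jPivotAux row j = match pivNat row with
      | some k => (j + (k : Int), true)
      | none => (0, false) := by
  induction row with
  | nil => intro j; simp [jPivotAux, pivNat]
  | cons x xs ih =>
    intro j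
    by_cases hx : x ≠ 0
    · simp [jPivotAux, pivNat, hx]
    · simp only [jPivotAux, pivNat, hx, if_neg, ite_false, if_false, not_true]
      rw [ih (j + 1)]
      cases h : pivNat xs with
      | none => simp [h]
      | some k => simp [h]; ring

theorem pivNat_some (row : List Int) : ∀ m : Nat, pivNat row = some m →
    m < row.length ∧ row.getD m 0 ≠ 0 ∧ ∀ j < m, row.getD j 0 = 0 := by
  induction row with
  | nil => intro m h; simp [pivNat] at h
  | cons x xs ih =>
    intro m h
    by_cases hx : x ≠ 0
    · simp [pivNat, hx] at h
      subst h
      refine ⟨by simp, by simpa using hx, by omega⟩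
    · simp [pivNat, hx] at h
      obtain ⟨k, hk, rfl⟩ := h
      obtain ⟨h1, h2, h3⟩ := ih k hk
      refine ⟨by simpa using h1, by simpa using h2, ?_⟩
      intro j hj
      cases j with
      | zero => simpa using hx
      | succ j' => simpa using h3 j' (by omega)

theorem pivNat_none (row : List Int) : pivNat row = none →
    ∀ j < row.length, row.getD j 0 = 0 := by
  induction row with
  | nil => intro _ j hj; simp at hj
  | cons x xs ih =>
    intro h j hj
    by_cases hx : x ≠ 0
    · simp [pivNat, hx] at h
    · simp [pivNat, hx] at h
      cases j with
      | zero => simpa using hx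
      | succ j' => simpa using ih h j' (by simpa using hj)

-- a hit at column j implies the row has a pivot, and it is ≤ j
theorem hit_pivNat (row : List Int) (j : Nat) (h : Hit j row) :
    ∃ m, pivNat row = some m ∧ m ≤ j := by
  cases hp : pivNat row with
  | none =>
    exact absurd (pivNat_none row hp j h.1) h.2
  | some m =>
    refine ⟨m, rfl, ?_⟩
    by_contra hlt
    exact h.2 ((pivNat_some row m hp).2.2 j (by omega))

-- a pivot at m is a hit at m
theorem pivNat_hit (row : List Int) (m : Nat) (h : pivNat row = some m) : Hit m row :=
  ⟨(pivNat_some row m h).1, (pivNat_some row m h).2.1⟩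

-- ---- A-side loop characterisation ----

theorem aLoop_none (L : List (List Int)) : ∀ (i il jl : Int),
    (∀ r ∈ L, ∀ p, pivNat r = some p → ¬ ((p : Int) < jl)) →
    aLoop L i (il, jl) = (il, jl) := by
  induction L with
  | nil => intro i il jl _; rfl
  | cons r L' ih =>
    intro i il jl hno
    have hr : (jPivot r).1 < jl ∧ (jPivot r).2 = true → False := by
      intro ⟨h1, h2⟩
      unfold jPivot at h1 h2
      rw [jPivotAux_eq r 0] at h1 h2
      cases hp : pivNat r with
      | none => rw [hp] at h2; simp at h2
      | some k =>
        rw [hp] at h1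
        have := hno r (by simp) k hp
        simp at h1
        omega
    simp only [aLoop]
    rw [if_neg hr]
    exact ih (i + 1) il jl (fun r' hr' => hno r' (by simp [hr']))

theorem aLoop_found (L : List (List Int)) : ∀ (i il jl : Int) (k m : Nat)
    (hk : k < L.length)
    (hm : (m : Int) < jl)
    (hpk : pivNat L[k] = some m)
    (hbefore : ∀ i' (h : i' < k), ∀ p, pivNat (L[i']'(by omega)) = some p → m < p)
    (hafter : ∀ i' (h : i' < L.length), ∀ p, pivNat (L[i']'(h)) = some p → m ≤ p),
    (aLoop L i (il, jl)).1 = i + (k : Int) := by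
  induction L with
  | nil => intro i il jl k m hk; simp at hk
  | cons r L' ih =>
    intro i il jl k m hk hm hpk hbefore hafter
    cases k with
    | zero =>
      have hpr : pivNat r = some m := by simpa using hpk
      have hacc : (jPivot r).1 < jl ∧ (jPivot r).2 = true := by
        unfold jPivot; rw [jPivotAux_eq r 0, hpr]; exact ⟨by simpa using hm, rfl⟩
      simp only [aLoop]
      rw [if_pos hacc]
      have hstop : aLoop L' (i + 1) (i, (jPivot r).1) = (i, (jPivot r).1) := by
        apply aLoop_none
        intro r' hr' p hp
        have hmem := List.mem_iff_getElem.mp hr'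
        obtain ⟨i', hi', rfl⟩ := hmem
        have := hafter (i' + 1) (by simpa using Nat.succ_lt_succ hi') p (by simpa using hp)
        unfold jPivot; rw [jPivotAux_eq r 0, hpr]
        simp; omega
      rw [hstop]; simp
    | succ k' =>
      have hk' : k' < L'.length := by simpa using hk
      have hpk' : pivNat (L'[k']'hk') = some m := by simpa using hpk
      have hbefore' : ∀ i' (h : i' < k'), ∀ p, pivNat (L'[i']'(by omega)) = some p → m < p := by
        intro i' h p hp
        exact hbefore (i' + 1) (by omega) p (by simpa using hp)
      have hafter' : ∀ i' (h : i' < L'.length), ∀ p, pivNat (L'[i']'(h)) = some p → m ≤ p := by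
        intro i' h p hp
        exact hafter (i' + 1) (by simpa using Nat.succ_lt_succ h) p (by simpa using hp)
      simp only [aLoop]
      by_cases hacc : (jPivot r).1 < jl ∧ (jPivot r).2 = true
      · rw [if_pos hacc]
        -- row 0 was accepted: its pivot p satisfies m < p, recurse with threshold p
        obtain ⟨h1, h2⟩ := hacc
        unfold jPivot at h1 h2 ⊢
        rw [jPivotAux_eq r 0] at h1 h2 ⊢
        cases hp : pivNat r with
        | none => rw [hp] at h2; simp at h2
        | some p =>
          rw [hp] at h1
          have hmp : m < p := hbefore 0 (by omega) p (by simpa using hp)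
          have hrec := ih (i + 1) i ((0 : Int) + (p : Int)) k' m hk'
            (by push_cast; omega) hpk' hbefore' hafter'
          show (aLoop L' (i + 1) (i, (0 : Int) + (p : Int))).1 = i + ((k' : Nat) + 1 : Nat)
          rw [hrec]; push_cast; ring
      · rw [if_neg hacc]
        have := ih (i + 1) il jl k' m hk' hm hpk' hbefore' hafter'
        rw [this]; push_cast; ring

-- ---- B-side loop characterisation ----

theorem colScan_none (L : List (List Int)) : ∀ (j i : Nat),
    (∀ r ∈ L, ¬ Hit j r) → colScan L j i = none := by
  induction L with
  | nil => intro j i _; rfl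
  | cons r L' ih =>
    intro j i h
    simp only [colScan]
    rw [if_neg (show ¬(j < r.length ∧ r.getD j 0 ≠ 0) from h r (by simp))]
    exact ih j (i + 1) (fun r' hr' => h r' (by simp [hr']))

theorem colScan_found (L : List (List Int)) : ∀ (j i k : Nat)
    (hk : k < L.length)
    (hhit : Hit j (L[k]'hk))
    (hbefore : ∀ i' (h : i' < k), ¬ Hit j (L[i']'(by omega))),
    colScan L j i = some (i + k) := by
  induction L with
  | nil => intro j i k hk; simp at hk
  | cons r L' ih =>
    intro j i k hk hhit hbefore
    cases k with
    | zero =>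
      simp only [colScan]
      rw [if_pos (show j < r.length ∧ r.getD j 0 ≠ 0 by simpa using hhit)]
      simp
    | succ k' =>
      simp only [colScan]
      rw [if_neg (show ¬(j < r.length ∧ r.getD j 0 ≠ 0) from hbefore 0 (by omega))]
      have := ih j (i + 1) k' (by simpa using hk) (by simpa using hhit)
        (fun i' h => by simpa using hbefore (i' + 1) (by omega))
      rw [this]
      congr 1; omega

theorem jLoop_append (L : List (List Int)) : ∀ (js₁ js₂ : List Nat),
    (∀ j ∈ js₁, colScan L j 0 = none) →
    jLoop L (js₁ ++ js₂) = jLoop L js₂ := by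
  intro js₁
  induction js₁ with
  | nil => intro js₂ _; rfl
  | cons j js ih =>
    intro js₂ h
    simp only [List.cons_append, jLoop]
    rw [h j (by simp)]
    exact ih js₂ (fun j' hj' => h j' (by simp [hj']))

theorem jLoop_all_none (L : List (List Int)) : ∀ (js : List Nat),
    (∀ j ∈ js, colScan L j 0 = none) → jLoop L js = 0 := by
  intro js h
  have := jLoop_append L js [] h
  simpa using this

-- ===== MAIN =====

theorem main_equiv (matrix : List (List Int)) (hne : matrix ≠ []) :
    i_row_leftmost_pivot matrix = i_row_leftmost_pivot_alt matrix := by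
  unfold i_row_leftmost_pivot i_row_leftmost_pivot_alt
  set cap := (matrix.headD []).length with hcap
  by_cases hex : ∃ j, j < cap ∧ ∃ r ∈ matrix, Hit j r
  · -- there is a hit in some column < cap; take the least such column m
    have hmin := Nat.find_spec hex
    set m := Nat.find hex with hmdef
    obtain ⟨hmlt, r₀, hr₀mem, hr₀hit⟩ := hmin
    -- the first row hitting column m
    have hexrow : ∃ r ∈ matrix, Hit m r := ⟨r₀, hr₀mem, hr₀hit⟩
    have hexrow' : ∃ r ∈ matrix, decide (Hit m r) = true := by
      obtain ⟨r, hr, hh⟩ := hexrow; exact ⟨r, hr, by simpa using hh⟩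
    set k := matrix.findIdx (fun r => decide (Hit m r)) with hkdef
    have hklt : k < matrix.length := List.findIdx_lt_length_of_exists hexrow'
    have hkhit : Hit m (matrix[k]'hklt) := by
      have h := List.findIdx_getElem (w := hklt) (xs := matrix) (p := fun r => decide (Hit m r))
      exact of_decide_eq_true h
    have hkbefore : ∀ i' (h : i' < k), ¬ Hit m (matrix[i']'(by omega)) := by
      intro i' h hh
      have hne' := List.not_of_lt_findIdx (p := fun r => decide (Hit m r)) (xs := matrix) h
      rw [decide_eq_false_iff_not] at hne'
      exact hne' hh
    -- no hit at any column j < m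
    have hnohit : ∀ j < m, ∀ r ∈ matrix, ¬ Hit j r := by
      intro j hj r hr hh
      exact Nat.find_min hex hj ⟨by omega, r, hr, hh⟩
    -- pivot of row k is exactly m
    have hpivk : pivNat (matrix[k]'hklt) = some m := by
      obtain ⟨p, hp, hple⟩ := hit_pivNat _ m hkhit
      have : ¬ p < m := by
        intro hlt
        exact hnohit p hlt _ (List.getElem_mem hklt) (pivNat_hit _ p hp)
      have : p = m := by omega
      rwa [this] at hp
    -- rows with a pivot all have pivot ≥ m
    have hafter : ∀ i' (h : i' < matrix.length), ∀ p, pivNat (matrix[i']'h) = some p → m ≤ p := by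
      intro i' h p hp
      by_contra hlt
      exact hnohit p (by omega) _ (List.getElem_mem h) (pivNat_hit _ p hp)
    -- rows before k have pivot > m (≥ m and ≠ m since no hit at m)
    have hbefore : ∀ i' (h : i' < k), ∀ p, pivNat (matrix[i']'(by omega)) = some p → m < p := by
      intro i' h p hp
      have hge := hafter i' (by omega) p hp
      rcases Nat.lt_or_ge m p with h1 | h1
      · exact h1
      · have hpm : p = m := by omega
        rw [hpm] at hp
        exact absurd (pivNat_hit _ m hp) (hkbefore i' h)
    -- A returns k
    have hmcap : (m : Int) < (cap : Int) := by exact_mod_cast hmlt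
    have hA : (aLoop matrix 0 (0, (cap : Int))).1 = (k : Int) := by
      have := aLoop_found matrix 0 0 (cap : Int) k m hklt hmcap hpivk hbefore hafter
      simpa using this
    -- B returns k: range cap = range m ++ (m :: rest), all columns < m scan to none
    have hrange : List.range cap
        = List.range m ++ (m :: (List.range (cap - (m + 1))).map (m + 1 + ·)) := by
      have h1 : cap = (m + 1) + (cap - (m + 1)) := by omega
      rw [h1, List.range_add, List.range_succ, List.append_assoc]
      simp only [List.cons_append, List.nil_append, Nat.add_sub_cancel_left]
    have hBnone : ∀ j ∈ List.range m, colScan matrix j 0 = none := by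
      intro j hj
      exact colScan_none matrix j 0 (fun r hr => hnohit j (List.mem_range.mp hj) r hr)
    have hscan : colScan matrix m 0 = some k := by
      simpa using colScan_found matrix m 0 k hklt hkhit hkbefore
    rw [hA, hrange, jLoop_append matrix _ _ hBnone]
    simp only [jLoop, hscan]
  · -- no hit anywhere below cap: both sides return 0
    push_neg at hex
    have hA : (aLoop matrix 0 (0, (cap : Int))).1 = 0 := by
      rw [aLoop_none matrix 0 0 (cap : Int) ?_]
      intro r hr p hp hlt
      have hpcap : p < cap := by exact_mod_cast hlt
      exact hex p hpcap r hr (pivNat_hit r p hp)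
    have hB : jLoop matrix (List.range cap) = 0 := by
      apply jLoop_all_none
      intro j hj
      exact colScan_none matrix j 0 (fun r hr => hex j (List.mem_range.mp hj) r hr)
    rw [hA, hB]

-- ===== VERDICT (by name: the statement is the Claim_ definition above) =====
theorem i_row_leftmost_pivot_spec : Claim_equal_i_row_leftmost_pivot := by
  intro matrix _ hpre
  unfold Spec_i_row_leftmost_pivot
  exact main_equiv matrix hpre
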